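-- pv_equiv track=rewrite | github.com/kimtth/software-architect-mindmap | files/algorithm_pattern/dynamic_programming.py | count_valid_strings
-- ===== SOURCE A (Python) =====
-- def count_valid_strings(N, transitions, start_state, accept_states):
--     # dp[(i, state)] represents the count of strings of length i ending in 'state'.
--     dp = {}
--     dp[(0, start_state)] = 1  # Base case: empty string at start state.
--
--     # Process each character position.
--     for i in range(N):
--         new_dp = {}
--         # For each state reached so far, process all transitions.
--         for (i_state, state), count in dp.items():
--             for char, next_state in transitions.get(state, []):
--                 # Update count for the next state.
--                 new_dp[(i + 1, next_state)] = new_dp.get((i + 1, next_state), 0) + count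
--         dp = new_dp
--     # Sum counts for all states that are accepted.
--     return sum(count for (i_state, state), count in dp.items() if state in accept_states)
-- ===== SOURCE B (Python) =====
-- def count_valid_strings(N, transitions, start_state, accept_states):
--     # State universe: transition keys, their targets, and the start state.
--     states = []
--     for s in transitions:
--         if s not in states:
--             states.append(s)
--         for _, t in transitions.get(s, []):
--             if t not in states:
--                 states.append(t)
--     if start_state not in states:
--         states.append(start_state)
--
--     # Backward DP: g[s] = number of strings of length k that lead from s into an accept state.
--     g = {s: (1 if s in accept_states else 0) for s in states}
--     for _ in range(N):
--         g = {s: sum(g.get(t, 0) for _, t in transitions.get(s, [])) for s in states}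
--     return g.get(start_state, 0)
-- ===== Notes on version B (the rewrite author's own statement) =====
-- stated objective: alternative
-- what changed: Replaces the forward dict DP keyed by (length, state) tuples (pushing counts along every transition with accumulating inserts) by a backward DP over a precomputed state universe: g[s] counts suffixes from s into an accept state, each round recomputes g by a per-state sum over its outgoing transitions, and the answer is read off at the start state.
import Mathlib
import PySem

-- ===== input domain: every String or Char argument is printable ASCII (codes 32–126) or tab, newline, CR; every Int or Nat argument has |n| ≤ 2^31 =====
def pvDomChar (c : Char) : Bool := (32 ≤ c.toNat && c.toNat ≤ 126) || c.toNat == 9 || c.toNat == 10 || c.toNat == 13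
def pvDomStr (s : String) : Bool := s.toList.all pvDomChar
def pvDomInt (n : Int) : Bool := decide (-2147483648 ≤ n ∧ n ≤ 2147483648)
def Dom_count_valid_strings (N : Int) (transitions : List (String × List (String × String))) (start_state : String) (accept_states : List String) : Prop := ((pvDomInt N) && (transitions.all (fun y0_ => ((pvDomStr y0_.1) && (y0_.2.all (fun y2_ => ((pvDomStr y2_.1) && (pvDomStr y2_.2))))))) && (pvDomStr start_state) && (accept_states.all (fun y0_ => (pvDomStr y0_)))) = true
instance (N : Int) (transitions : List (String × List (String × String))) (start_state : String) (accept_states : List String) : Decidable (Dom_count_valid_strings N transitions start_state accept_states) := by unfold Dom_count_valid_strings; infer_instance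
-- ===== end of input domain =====

-- B replaces A's forward dict DP keyed by (length, state) with a backward DP over a precomputed
-- state universe (same exact results; a genuinely different traversal, not measured faster).
-- ===== PORT A =====
-- Port of A: dict DP keyed by (length, state), rebuilt each of the N rounds.
def count_valid_strings (N : Int) (transitions : List (String × List (String × String))) (start_state : String) (accept_states : List String) : Int :=
  let T := PySem.Dict.ofList transitions
  let dp0 : PySem.Dict (Int × String) Int := (PySem.Dict.empty).insert (0, start_state) 1
  let dp := (PySem.List.pyRange 0 N 1).foldl (fun dp i =>
      dp.items.foldl (fun new_dp p =>
        (T.getD p.1.2 []).foldl (fun new_dp q =>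
          new_dp.insert (i + 1, q.2) (new_dp.getD (i + 1, q.2) 0 + p.2)) new_dp)
        PySem.Dict.empty) dp0
  ((dp.items.filter (fun p => accept_states.contains p.1.2)).map (fun p => p.2)).sum

-- ===== PORT B =====
-- B-side helper: the state universe (keys, their targets, the start state), in first-seen order.
def cvsStates (transitions : List (String × List (String × String))) (start_state : String) : List String :=
  let T := PySem.Dict.ofList transitions
  let states := T.keys.foldl (fun states s =>
      (T.getD s []).foldl (fun states q => PySem.Set.add states q.2) (PySem.Set.add states s)) []
  PySem.Set.add states start_state

-- Port of B: backward DP over the state universe; g[s] counts length-k suffixes from s into an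
-- accept state; after N rounds the answer is read off at the start state.
def count_valid_strings_alt (N : Int) (transitions : List (String × List (String × String))) (start_state : String) (accept_states : List String) : Int :=
  let T := PySem.Dict.ofList transitions
  let states := cvsStates transitions start_state
  let g0 := PySem.Dict.ofList (states.map (fun s =>
      (s, if accept_states.contains s then (1 : Int) else 0)))
  let g := (PySem.List.pyRange 0 N 1).foldl (fun g _ =>
      PySem.Dict.ofList (states.map (fun s =>
        (s, ((T.getD s []).map (fun q => g.getD q.2 0)).sum)))) g0
  g.getD start_state 0

-- ===== PRECONDITION & SPEC =====
def Spec_count_valid_strings (N : Int) (transitions : List (String × List (String × String))) (start_state : String) (accept_states : List String) (out : Int) : Prop := out = count_valid_strings_alt N transitions start_state accept_states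
instance (N : Int) (transitions : List (String × List (String × String))) (start_state : String) (accept_states : List String) (out : Int) : Decidable (Spec_count_valid_strings N transitions start_state accept_states out) := by unfold Spec_count_valid_strings; infer_instance

-- ===== CLAIM (what is proved, stated in full; the proofs are below) =====
def Claim_equal_count_valid_strings : Prop := ∀ (N : Int) (transitions : List (String × List (String × String))) (start_state : String) (accept_states : List String), Dom_count_valid_strings N transitions start_state accept_states → Spec_count_valid_strings N transitions start_state accept_states (count_valid_strings N transitions start_state accept_states)

-- ===== LEMMAS AND PROOFS =====

def tget (transitions : List (String × List (String × String))) (a : String) : List (String × String) :=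
  (PySem.Dict.ofList transitions).getD a []

def mval (transitions : List (String × List (String × String))) (a b : String) : Int :=
  (((tget transitions a).filter (fun q => q.2 == b)).map (fun _ => (1 : Int))).sum

def vmul (U : List String) (v : String → Int) (m : String → String → Int) : String → Int :=
  fun c => (U.map (fun b => v b * m b c)).sum

def fvec (transitions : List (String × List (String × String))) (start_state : String)
    (U : List String) : Nat → String → Int
  | 0 => fun s => if s == start_state then 1 else 0
  | k+1 => vmul U (fvec transitions start_state U k) (mval transitions)

def gfun (transitions : List (String × List (String × String))) (accept_states : List String) :
    Nat → String → Int
  | 0 => fun s => if accept_states.contains s then 1 else 0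
  | k+1 => fun s => ((tget transitions s).map (fun q => gfun transitions accept_states k q.2)).sum

theorem sum_swap {α β : Type} (l1 : List α) (l2 : List β) (f : α → β → Int) :
    (l1.map (fun a => (l2.map (fun b => f a b)).sum)).sum
      = (l2.map (fun b => (l1.map (fun a => f a b)).sum)).sum := by
  induction l1 with
  | nil => simp
  | cons a t ih =>
    simp only [List.map_cons, List.sum_cons]
    rw [ih, ← PySem.List.sum_map_add_int]

def statesFold (transitions : List (String × List (String × String))) : List String :=
  (PySem.Dict.ofList transitions).keys.foldl (fun states k =>
      ((PySem.Dict.ofList transitions).getD k []).foldl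
        (fun states q => PySem.Set.add states q.2) (PySem.Set.add states k)) []

theorem cvsStates_eq (transitions : List (String × List (String × String))) (start_state : String) :
    cvsStates transitions start_state = PySem.Set.add (statesFold transitions) start_state := rfl

theorem nodup_foldl_add2 {α : Type} (f : α → String) (l : List α) (s : List String)
    (hs : s.Nodup) : (l.foldl (fun s y => PySem.Set.add s (f y)) s).Nodup := by
  induction l generalizing s with
  | nil => exact hs
  | cons a t ih => exact ih _ (PySem.Set.nodup_add s (f a) hs)

theorem mem_foldl_add2 {α : Type} (f : α → String) (l : List α) (s : List String) (x : String)
    (hx : x ∈ s) : x ∈ l.foldl (fun s y => PySem.Set.add s (f y)) s := by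
  induction l generalizing s with
  | nil => exact hx
  | cons a t ih => exact ih _ ((PySem.Set.mem_add s (f a) x).mpr (Or.inl hx))

theorem nodup_statesFoldAux (transitions : List (String × List (String × String))) :
    ∀ (l : List String) (s : List String), s.Nodup →
      (l.foldl (fun states k => ((PySem.Dict.ofList transitions).getD k []).foldl
        (fun states q => PySem.Set.add states q.2) (PySem.Set.add states k)) s).Nodup := by
  intro l
  induction l with
  | nil => intro s hs; exact hs
  | cons k t ih =>
    intro s hs
    exact ih _ (nodup_foldl_add2 (fun q : String × String => q.2) _ _ (PySem.Set.nodup_add s k hs))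

theorem mem_statesFoldAux_mono (transitions : List (String × List (String × String)))
    (l : List String) (s : List String) (x : String) (hx : x ∈ s) :
    x ∈ l.foldl (fun states k => ((PySem.Dict.ofList transitions).getD k []).foldl
        (fun states q => PySem.Set.add states q.2) (PySem.Set.add states k)) s := by
  induction l generalizing s with
  | nil => exact hx
  | cons k t ih =>
    exact ih _ (mem_foldl_add2 (fun q : String × String => q.2) _ _ x ((PySem.Set.mem_add s k x).mpr (Or.inl hx)))

theorem nodup_cvsStates (transitions : List (String × List (String × String))) (start_state : String) :
    (cvsStates transitions start_state).Nodup := by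
  rw [cvsStates_eq]
  exact PySem.Set.nodup_add _ _ (nodup_statesFoldAux transitions _ [] List.nodup_nil)

theorem start_mem_cvsStates (transitions : List (String × List (String × String))) (start_state : String) :
    start_state ∈ cvsStates transitions start_state := by
  rw [cvsStates_eq]
  exact (PySem.Set.mem_add _ _ _).mpr (Or.inr rfl)

theorem target_mem_cvsStates (transitions : List (String × List (String × String))) (start_state : String)
    (a : String) (q : String × String) (hq : q ∈ tget transitions a) :
    q.2 ∈ cvsStates transitions start_state := by
  rw [cvsStates_eq]
  refine (PySem.Set.mem_add _ _ _).mpr (Or.inl ?_)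
  -- a must be a contained key, else tget a = []
  by_cases hc : (PySem.Dict.ofList transitions).contains a = true
  · have hmem : a ∈ (PySem.Dict.ofList transitions).keys :=
      (PySem.Dict.contains_iff_mem_keys _ a).mp hc
    unfold statesFold
    -- induction over the keys list
    have main : ∀ (l : List String) (s : List String), a ∈ l →
        q.2 ∈ l.foldl (fun states k => ((PySem.Dict.ofList transitions).getD k []).foldl
          (fun states q => PySem.Set.add states q.2) (PySem.Set.add states k)) s := by
      intro l
      induction l with
      | nil => intro s h; cases h
      | cons k t ih =>
        intro s h
        rcases List.mem_cons.mp h with h | h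
        · subst h
          rw [List.foldl_cons]
          apply mem_statesFoldAux_mono
          have := PySem.Set.mem_foldl_add (l := tget transitions a) (f := fun q => q.2)
            (s := PySem.Set.add s a) (y := q.2)
          exact this.mpr (Or.inr ⟨q, hq, rfl⟩)
        · exact ih _ h
    exact main _ [] hmem
  · exfalso
    have : tget transitions a = [] := by
      unfold tget
      exact PySem.Dict.getD_of_not_contains _ _ (by simpa using hc)
    rw [this] at hq
    cases hq

theorem getD_dict_ofList_map {κ ν : Type} [BEq κ] [LawfulBEq κ] (l : List κ) (g : κ → ν)
    (hl : l.Nodup) (k : κ) (hk : k ∈ l) (d0 : ν) :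
    (PySem.Dict.ofList (l.map (fun x => (x, g x)))).getD k d0 = g k := by
  have h1 : PySem.Dict.ofList (l.map fun x => (x, g x))
      = l.foldl (fun d x => d.insert x (g x)) PySem.Dict.empty := by
    show (l.map fun x => (x, g x)).foldl (fun d p => d.insert p.1 p.2) PySem.Dict.empty = _
    rw [List.foldl_map]
  rw [h1]
  have hitems := PySem.Dict.items_foldl_insert_fresh l (fun x => x) g PySem.Dict.empty
    (fun a _ => by simp [PySem.Dict.contains_empty]) (by simpa using hl)
  have hnd : (l.foldl (fun d x => d.insert x (g x)) PySem.Dict.empty).keys.Nodup := by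
    have := PySem.Dict.nodup_keys_foldl_insert_key l (fun x => x) (fun _ x => g x)
      PySem.Dict.empty (by simp [PySem.Dict.keys_empty])
    exact this
  refine PySem.Dict.getD_of_mem_items _ ?_ hnd d0
  rw [hitems]
  show (k, g k) ∈ (PySem.Dict.empty : PySem.Dict κ ν).items ++ l.map (fun x => (x, g x))
  refine List.mem_append_right _ ?_
  exact List.mem_map.mpr ⟨k, hk, rfl⟩

-- weighted counter
theorem getD_foldl_insert_addw {κ : Type} [BEq κ] [LawfulBEq κ] [DecidableEq κ]
    (l : List (κ × Int)) (d : PySem.Dict κ Int) (k : κ) :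
    (l.foldl (fun d p => d.insert p.1 (d.getD p.1 0 + p.2)) d).getD k 0
      = d.getD k 0 + (l.map (fun p => if p.1 = k then p.2 else 0)).sum := by
  induction l generalizing d with
  | nil => simp
  | cons p t ih =>
    simp only [List.foldl_cons, List.map_cons, List.sum_cons]
    rw [ih, PySem.Dict.getD_insert]
    by_cases h : k = p.1
    · subst h; simp
      ring
    · rw [if_neg h, if_neg (fun hh => h hh.symm)]
      ring

theorem sum_map_flatMap {α β : Type} (l : List α) (g : α → List β) (h : β → Int) :
    ((l.flatMap g).map h).sum = (l.map (fun a => ((g a).map h).sum)).sum := by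
  induction l with
  | nil => simp
  | cons a t ih => simp [List.flatMap_cons, ih]

theorem sum_ite_eq_mul_cnt (l : List (String × String)) (t : String) (c : Int) :
    (l.map (fun q => if q.2 = t then c else 0)).sum
      = c * ((l.filter (fun q => q.2 == t)).map (fun _ => (1 : Int))).sum := by
  induction l with
  | nil => simp
  | cons q tl ih =>
    by_cases h : q.2 = t
    · simp [h, ih]
      ring
    · simp [h, ih]

-- sum extension from a nodup sublist to a nodup superlist, given vanishing off the sublist
theorem sum_extend (S U : List String) (hS : S.Nodup) (hU : U.Nodup)
    (hsub : ∀ s ∈ S, s ∈ U) (f : String → Int) (h0 : ∀ s ∈ U, s ∉ S → f s = 0) :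
    (S.map f).sum = (U.map f).sum := by
  rw [← List.sum_toFinset f hS, ← List.sum_toFinset f hU]
  refine Finset.sum_subset ?_ ?_
  · intro x hx
    rw [List.mem_toFinset] at hx ⊢
    exact hsub x hx
  · intro x hx hnx
    rw [List.mem_toFinset] at hx hnx
    exact h0 x hx hnx

def astep (transitions : List (String × List (String × String))) (i : Int)
    (dp : PySem.Dict (Int × String) Int) : PySem.Dict (Int × String) Int :=
  dp.items.foldl (fun new_dp p =>
    (tget transitions p.1.2).foldl (fun nd q =>
      nd.insert (i + 1, q.2) (nd.getD (i + 1, q.2) 0 + p.2)) new_dp) PySem.Dict.empty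

theorem astep_eq_flat (transitions : List (String × List (String × String))) (i : Int)
    (dp : PySem.Dict (Int × String) Int) :
    astep transitions i dp
      = (dp.items.flatMap (fun p => (tget transitions p.1.2).map (fun q => ((i + 1, q.2), p.2)))).foldl
          (fun nd pr => nd.insert pr.1 (nd.getD pr.1 0 + pr.2)) PySem.Dict.empty := by
  unfold astep
  rw [List.foldl_flatMap]
  congr 1
  funext nd p
  rw [List.foldl_map]

def AInv (transitions : List (String × List (String × String))) (start_state : String)
    (U : List String) (k : Nat) (dp : PySem.Dict (Int × String) Int) : Prop :=
  ∃ S : List String, S.Nodup ∧ (∀ s ∈ S, s ∈ U) ∧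
    dp.keys = S.map (fun s => (((k : Int)), s)) ∧
    ∀ s ∈ U, dp.getD ((k : Int), s) 0 = fvec transitions start_state U k s

theorem AInv_zero (transitions : List (String × List (String × String))) (start_state : String)
    (U : List String) (hst : start_state ∈ U) :
    AInv transitions start_state U 0 (PySem.Dict.empty.insert ((0 : Int), start_state) 1) := by
  refine ⟨[start_state], List.nodup_singleton _, by simpa using hst, ?_, ?_⟩
  · rw [PySem.Dict.keys_insert_of_not_contains _ _ (PySem.Dict.contains_empty _)]
    simp [PySem.Dict.keys_empty]
  · intro s _
    rw [PySem.Dict.getD_insert]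
    show _ = (if s == start_state then (1:Int) else 0)
    by_cases h : s = start_state
    · simp [h]
    · rw [if_neg (by simp [Prod.ext_iff, h]), if_neg (by simp [h])]
      simp [PySem.Dict.getD_empty]

theorem pairfn_inj (k : Int) : Function.Injective (fun s : String => (k, s)) := by
  intro a b h
  simpa using h

theorem AInv_step (transitions : List (String × List (String × String))) (start_state : String)
    (U : List String) (hUnd : U.Nodup)
    (hclosure : ∀ (a : String) (q : String × String), q ∈ tget transitions a → q.2 ∈ U)
    (k : Nat) (dp : PySem.Dict (Int × String) Int)
    (h : AInv transitions start_state U k dp) :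
    AInv transitions start_state U (k+1) (astep transitions (k : Int) dp) := by
  obtain ⟨S, hSnd, hSU, hkeys, hget⟩ := h
  have hkeysnd : dp.keys.Nodup := by
    rw [hkeys]; exact hSnd.map (pairfn_inj (k : Int))
  have hitems : dp.items = S.map (fun s => ((((k:Int)), s), dp.getD (((k:Int)), s) 0)) := by
    rw [PySem.Dict.items_eq_map_keys dp hkeysnd 0, hkeys, List.map_map]
    rfl
  have hnotmem : ∀ s, s ∉ S → dp.getD (((k:Int)), s) 0 = 0 := by
    intro s hs
    apply PySem.Dict.getD_of_not_contains
    by_cases hc : dp.contains ((k:Int), s) = true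
    · exfalso
      have hmem := (PySem.Dict.contains_iff_mem_keys dp _).mp hc
      rw [hkeys] at hmem
      obtain ⟨x, hx, hxe⟩ := List.mem_map.mp hmem
      have : x = s := by simpa using congrArg Prod.snd hxe
      exact hs (this ▸ hx)
    · simpa using hc
  rw [astep_eq_flat]
  set L := dp.items.flatMap (fun p => (tget transitions p.1.2).map (fun q => (((k:Int) + 1, q.2), p.2))) with hLdef
  have hcast : ((k+1 : Nat) : Int) = (k : Int) + 1 := by push_cast; ring
  have hkeys' : (L.foldl (fun nd pr => nd.insert pr.1 (nd.getD pr.1 0 + pr.2)) PySem.Dict.empty).keys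
      = PySem.Set.ofList (L.map (fun pr => pr.1)) := by
    have := PySem.Dict.keys_foldl_insert_key L (fun pr => pr.1)
      (fun nd pr => nd.getD pr.1 0 + pr.2) PySem.Dict.empty
    rw [this, PySem.Dict.keys_empty, PySem.Set.update_nil_left]
  have hmemL : ∀ x ∈ L.map (fun pr => pr.1), x.1 = (k:Int) + 1 ∧ x.2 ∈ U := by
    intro x hx
    obtain ⟨pr, hpr, hpre⟩ := List.mem_map.mp hx
    obtain ⟨p, hp, hq⟩ := List.mem_flatMap.mp hpr
    obtain ⟨q, hqmem, hqe⟩ := List.mem_map.mp hq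
    subst hpre
    rw [← hqe]
    exact ⟨rfl, hclosure p.1.2 q hqmem⟩
  refine ⟨(PySem.Set.ofList (L.map (fun pr => pr.1))).map (fun pr => pr.2), ?_, ?_, ?_, ?_⟩
  · refine List.Nodup.map_on ?_ (PySem.Set.nodup_ofList _)
    intro x hx y hy hxy
    have hx1 := (hmemL x ((PySem.Set.mem_ofList _ _).mp hx)).1
    have hy1 := (hmemL y ((PySem.Set.mem_ofList _ _).mp hy)).1
    exact Prod.ext (hx1.trans hy1.symm) hxy
  · intro s hs
    obtain ⟨x, hx, hxe⟩ := List.mem_map.mp hs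
    exact hxe ▸ (hmemL x ((PySem.Set.mem_ofList _ _).mp hx)).2
  · rw [hkeys', List.map_map]
    symm
    have hid : ∀ x ∈ PySem.Set.ofList (L.map (fun pr => pr.1)),
        (((fun s => ((((k+1:Nat)) : Int), s)) ∘ (fun pr : Int × String => pr.2)) x) = id x := by
      intro x hx
      have h1 := (hmemL x ((PySem.Set.mem_ofList _ _).mp hx)).1
      show ((((k+1:Nat) : Int)), x.2) = x
      rw [hcast, ← h1]
    rw [List.map_congr_left hid, List.map_id]
  · intro t ht
    rw [getD_foldl_insert_addw, PySem.Dict.getD_empty, zero_add]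
    rw [hLdef, sum_map_flatMap]
    have hinner : ∀ p ∈ dp.items,
        (((tget transitions p.1.2).map (fun q => (((k:Int) + 1, q.2), p.2))).map
          (fun pr => if pr.1 = (((k+1:Nat) : Int), t) then pr.2 else 0)).sum
        = p.2 * mval transitions p.1.2 t := by
      intro p _
      rw [List.map_map]
      have : ((fun pr : (Int × String) × Int => if pr.1 = (((k+1:Nat) : Int), t) then pr.2 else 0) ∘
          (fun q : String × String => (((k:Int) + 1, q.2), p.2)))
          = fun q : String × String => if q.2 = t then p.2 else 0 := by
        funext q
        simp [Function.comp, hcast, Prod.ext_iff]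
      rw [this, sum_ite_eq_mul_cnt]
      rfl
    rw [List.map_congr_left hinner, hitems, List.map_map]
    have hmapS : (S.map ((fun p : (Int × String) × Int => p.2 * mval transitions p.1.2 t) ∘
        (fun s => ((((k:Int)), s), dp.getD (((k:Int)), s) 0))))
        = S.map (fun s => fvec transitions start_state U k s * mval transitions s t) := by
      refine List.map_congr_left ?_
      intro s hs
      simp only [Function.comp]
      rw [hget s (hSU s hs)]
    rw [hmapS]
    rw [sum_extend S U hSnd hUnd hSU _ (fun s hsU hsS => by
      rw [← hget s hsU, hnotmem s hsS, zero_mul])]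
    rfl

theorem A_loop (transitions : List (String × List (String × String))) (start_state : String)
    (U : List String) (hUnd : U.Nodup) (hst : start_state ∈ U)
    (hclosure : ∀ (a : String) (q : String × String), q ∈ tget transitions a → q.2 ∈ U) :
    ∀ n : Nat, AInv transitions start_state U n
      ((PySem.List.pyRange 0 (n : Int) 1).foldl (fun dp i => astep transitions i dp)
        (PySem.Dict.empty.insert ((0 : Int), start_state) 1)) := by
  intro n
  induction n with
  | zero =>
    rw [PySem.List.pyRange_one_eq_nil (by norm_num)]
    exact AInv_zero transitions start_state U hst
  | succ n ih =>
    have hc : ((n+1 : Nat) : Int) = (n : Int) + 1 := by push_cast; ring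
    rw [hc, PySem.List.pyRange_one_succ_right (by positivity), List.foldl_append]
    simpa using AInv_step transitions start_state U hUnd hclosure n _ ih

theorem A_value (transitions : List (String × List (String × String))) (start_state : String)
    (U : List String) (hUnd : U.Nodup) (accept_states : List String)
    (k : Nat) (dp : PySem.Dict (Int × String) Int)
    (h : AInv transitions start_state U k dp) :
    ((dp.items.filter (fun p => accept_states.contains p.1.2)).map (fun p => p.2)).sum
      = ((U.filter (fun s => accept_states.contains s)).map
          (fun s => fvec transitions start_state U k s)).sum := by
  obtain ⟨S, hSnd, hSU, hkeys, hget⟩ := h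
  have hkeysnd : dp.keys.Nodup := by
    rw [hkeys]; exact hSnd.map (pairfn_inj (k : Int))
  have hitems : dp.items = S.map (fun s => ((((k:Int)), s), dp.getD (((k:Int)), s) 0)) := by
    rw [PySem.Dict.items_eq_map_keys dp hkeysnd 0, hkeys, List.map_map]
    rfl
  have hnotmem : ∀ s, s ∉ S → dp.getD (((k:Int)), s) 0 = 0 := by
    intro s hs
    apply PySem.Dict.getD_of_not_contains
    by_cases hc : dp.contains ((k:Int), s) = true
    · exfalso
      have hmem := (PySem.Dict.contains_iff_mem_keys dp _).mp hc
      rw [hkeys] at hmem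
      obtain ⟨x, hx, hxe⟩ := List.mem_map.mp hmem
      have : x = s := by simpa using congrArg Prod.snd hxe
      exact hs (this ▸ hx)
    · simpa using hc
  rw [hitems, List.filter_map, List.map_map]
  have h1 : (S.filter ((fun p : (Int × String) × Int => accept_states.contains p.1.2) ∘
      (fun s => ((((k:Int)), s), dp.getD (((k:Int)), s) 0))))
      = S.filter (fun s => accept_states.contains s) := by rfl
  rw [h1]
  have h2 : (S.filter (fun s => accept_states.contains s)).map
        ((fun p : (Int × String) × Int => p.2) ∘ (fun s => ((((k:Int)), s), dp.getD (((k:Int)), s) 0)))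
      = (S.filter (fun s => accept_states.contains s)).map
        (fun s => fvec transitions start_state U k s) := by
    refine List.map_congr_left ?_
    intro s hs
    exact hget s (hSU s (List.mem_of_mem_filter hs))
  rw [h2]
  refine sum_extend _ _ (hSnd.filter _) (hUnd.filter _) ?_ _ ?_
  · intro s hs
    rw [List.mem_filter] at hs ⊢
    exact ⟨hSU s hs.1, hs.2⟩
  · intro s hsU hsS
    rw [List.mem_filter] at hsU
    have : s ∉ S := fun hmem => hsS (List.mem_filter.mpr ⟨hmem, hsU.2⟩)
    rw [← hget s hsU.1]
    exact hnotmem s this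


-- ===== B-side loop characterization and the forward/backward exchange =====

theorem beq_swap {α : Type} [BEq α] [LawfulBEq α] (a b : α) : (a == b) = (b == a) := by
  by_cases h : a = b
  · subst h; rfl
  · have h' : b ≠ a := fun hh => h hh.symm
    simp [beq_iff_eq, h, h']

theorem sum_ind_zero (U : List String) (x : String) (hx : x ∉ U) (f : String → Int) :
    (U.map (fun s => (if x == s then (1 : Int) else 0) * f s)).sum = 0 := by
  induction U with
  | nil => rfl
  | cons a t ih =>
    have hxa : x ≠ a := fun h => hx (h ▸ List.mem_cons_self)
    simp only [List.map_cons, List.sum_cons]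
    rw [if_neg (by simp [beq_iff_eq, hxa]), ih (fun h => hx (List.mem_cons_of_mem a h))]
    ring

theorem sum_ind (U : List String) (hU : U.Nodup) (x : String) (hx : x ∈ U) (f : String → Int) :
    (U.map (fun s => (if x == s then (1 : Int) else 0) * f s)).sum = f x := by
  induction U with
  | nil => cases hx
  | cons a t ih =>
    simp only [List.map_cons, List.sum_cons]
    obtain ⟨hat, htn⟩ := List.nodup_cons.mp hU
    rcases List.mem_cons.mp hx with h | h
    · subst h
      rw [if_pos (by simp), sum_ind_zero t x hat f]
      ring
    · have hxa : x ≠ a := fun hh => hat (hh ▸ h)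
      rw [if_neg (by simp [beq_iff_eq, hxa]), ih htn h]
      ring

theorem edge_sum (U : List String) (hU : U.Nodup) (l : List (String × String))
    (hl : ∀ q ∈ l, q.2 ∈ U) (f : String → Int) :
    (l.map (fun q => f q.2)).sum
      = (U.map (fun s => ((l.filter (fun q => q.2 == s)).map (fun _ => (1 : Int))).sum * f s)).sum := by
  induction l with
  | nil => simp
  | cons q t ih =>
    simp only [List.map_cons, List.sum_cons]
    have hsplit : ∀ s : String,
        (((q :: t).filter (fun q => q.2 == s)).map (fun _ => (1 : Int))).sum
        = (if q.2 == s then (1 : Int) else 0) + ((t.filter (fun q => q.2 == s)).map (fun _ => (1 : Int))).sum := by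
      intro s
      by_cases h : q.2 == s
      · simp [List.filter_cons, h]
      · simp [List.filter_cons, h]
    have hRHS : (U.map (fun s =>
          (((q :: t).filter (fun q => q.2 == s)).map (fun _ => (1 : Int))).sum * f s)).sum
        = (U.map (fun s => (if q.2 == s then (1 : Int) else 0) * f s)).sum
          + (U.map (fun s => ((t.filter (fun q => q.2 == s)).map (fun _ => (1 : Int))).sum * f s)).sum := by
      rw [← PySem.List.sum_map_add_int]
      refine congrArg List.sum (List.map_congr_left fun s _ => ?_)
      rw [hsplit s, add_mul]
    rw [hRHS, ih (fun p hp => hl p (List.mem_cons_of_mem q hp))]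
    congr 1
    exact (sum_ind U hU q.2 (hl q List.mem_cons_self) f).symm

theorem shift_step (transitions : List (String × List (String × String))) (start_state : String)
    (accept_states : List String) (U : List String) (hU : U.Nodup)
    (hclosure : ∀ (a : String) (q : String × String), q ∈ tget transitions a → q.2 ∈ U)
    (k j : Nat) :
    (U.map (fun s => fvec transitions start_state U (k+1) s * gfun transitions accept_states j s)).sum
      = (U.map (fun s => fvec transitions start_state U k s * gfun transitions accept_states (j+1) s)).sum := by
  calc (U.map (fun s => fvec transitions start_state U (k+1) s * gfun transitions accept_states j s)).sum
      = (U.map (fun s => (U.map (fun b => fvec transitions start_state U k b * mval transitions b s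
          * gfun transitions accept_states j s)).sum)).sum := by
        refine congrArg List.sum (List.map_congr_left fun s _ => ?_)
        show vmul U (fvec transitions start_state U k) (mval transitions) s * _ = _
        rw [vmul, ← List.sum_map_mul_right]
    _ = (U.map (fun b => (U.map (fun s => fvec transitions start_state U k b * mval transitions b s
          * gfun transitions accept_states j s)).sum)).sum :=
        sum_swap U U (fun s b => fvec transitions start_state U k b * mval transitions b s
          * gfun transitions accept_states j s)
    _ = (U.map (fun b => fvec transitions start_state U k b
          * gfun transitions accept_states (j+1) b)).sum := by
        refine congrArg List.sum (List.map_congr_left fun b _ => ?_)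
        have h1 : (U.map (fun s => fvec transitions start_state U k b * mval transitions b s
            * gfun transitions accept_states j s)).sum
            = fvec transitions start_state U k b * (U.map (fun s => mval transitions b s
              * gfun transitions accept_states j s)).sum := by
          rw [← List.sum_map_mul_left]
          exact congrArg List.sum (List.map_congr_left fun s _ => by ring)
        rw [h1]
        congr 1
        show _ = ((tget transitions b).map (fun q => gfun transitions accept_states j q.2)).sum
        rw [edge_sum U hU (tget transitions b) (fun q hq => hclosure b q hq)
          (gfun transitions accept_states j)]
        rfl

theorem chain (transitions : List (String × List (String × String))) (start_state : String)
    (accept_states : List String) (U : List String) (hU : U.Nodup)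
    (hclosure : ∀ (a : String) (q : String × String), q ∈ tget transitions a → q.2 ∈ U) :
    ∀ (k j : Nat),
    (U.map (fun s => fvec transitions start_state U k s * gfun transitions accept_states j s)).sum
      = (U.map (fun s => fvec transitions start_state U 0 s * gfun transitions accept_states (k+j) s)).sum := by
  intro k
  induction k with
  | zero => intro j; simp
  | succ k ih =>
    intro j
    rw [shift_step transitions start_state accept_states U hU hclosure k j, ih (j+1),
      show k + (j+1) = k + 1 + j from by omega]

theorem sum_filter_ite (U : List String) (P : String → Bool) (f : String → Int) :
    (U.map (fun s => f s * (if P s then (1 : Int) else 0))).sum = ((U.filter P).map f).sum := by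
  have hpt : (U.map (fun s => f s * (if P s then (1 : Int) else 0)))
      = (U.map (fun s => if P s then f s else 0)) := by
    refine List.map_congr_left fun s _ => ?_
    by_cases h : P s <;> simp [h]
  rw [hpt]
  induction U with
  | nil => rfl
  | cons a t ih =>
    by_cases h : P a
    · simp [List.filter_cons, h, ih]
    · simp [List.filter_cons, h, ih]


def bstep (transitions : List (String × List (String × String))) (U : List String)
    (g : PySem.Dict String Int) : PySem.Dict String Int :=
  PySem.Dict.ofList (U.map (fun s =>
    (s, (((PySem.Dict.ofList transitions).getD s []).map (fun q => g.getD q.2 0)).sum)))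

theorem B_loop (transitions : List (String × List (String × String)))
    (accept_states : List String) (U : List String) (hU : U.Nodup)
    (hclosure : ∀ (a : String) (q : String × String), q ∈ tget transitions a → q.2 ∈ U) :
    ∀ n : Nat, ∀ s ∈ U,
    ((PySem.List.pyRange 0 (n : Int) 1).foldl (fun g _ => bstep transitions U g)
        (PySem.Dict.ofList (U.map (fun s =>
          (s, if accept_states.contains s then (1 : Int) else 0))))).getD s 0
      = gfun transitions accept_states n s := by
  intro n
  induction n with
  | zero =>
    intro s hs
    rw [PySem.List.pyRange_one_eq_nil (by norm_num), List.foldl_nil]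
    exact getD_dict_ofList_map U (fun s => if accept_states.contains s then (1 : Int) else 0)
      hU s hs 0
  | succ n ih =>
    intro s hs
    have hc : ((n+1 : Nat) : Int) = (n : Int) + 1 := by push_cast; ring
    rw [hc, PySem.List.pyRange_one_succ_right (by positivity), List.foldl_append]
    simp only [List.foldl_cons, List.foldl_nil]
    show (bstep transitions U _).getD s 0 = _
    unfold bstep
    rw [getD_dict_ofList_map U _ hU s hs 0]
    show (((PySem.Dict.ofList transitions).getD s []).map (fun q => _)).sum
      = gfun transitions accept_states (n+1) s
    refine congrArg List.sum (List.map_congr_left fun q hq => ?_)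
    exact ih q.2 (hclosure s q hq)

-- ===== main equivalence =====

set_option maxHeartbeats 1000000 in
theorem main_equiv (N : Int) (transitions : List (String × List (String × String)))
    (start_state : String) (accept_states : List String) :
    count_valid_strings N transitions start_state accept_states
      = count_valid_strings_alt N transitions start_state accept_states := by
  have hUnd := nodup_cvsStates transitions start_state
  have hst := start_mem_cvsStates transitions start_state
  have hclosure := fun a q hq => target_mem_cvsStates transitions start_state a q hq
  -- A side
  have hA : count_valid_strings N transitions start_state accept_states
      = (((cvsStates transitions start_state).filter (fun s => accept_states.contains s)).map
          (fun s => fvec transitions start_state (cvsStates transitions start_state) N.toNat s)).sum := by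
    show ((((PySem.List.pyRange 0 N 1).foldl (fun dp i => astep transitions i dp)
        (PySem.Dict.empty.insert ((0 : Int), start_state) 1)).items.filter
          (fun p => accept_states.contains p.1.2)).map (fun p => p.2)).sum = _
    have hrange : PySem.List.pyRange 0 N 1 = PySem.List.pyRange 0 (N.toNat : Int) 1 := by
      by_cases h : 0 ≤ N
      · rw [Int.toNat_of_nonneg h]
      · rw [PySem.List.pyRange_one_eq_nil (by omega), PySem.List.pyRange_one_eq_nil (by omega)]
    rw [hrange]
    exact A_value transitions start_state _ hUnd accept_states N.toNat _
      (A_loop transitions start_state _ hUnd hst hclosure N.toNat)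
  -- B side
  have hB : count_valid_strings_alt N transitions start_state accept_states
      = gfun transitions accept_states N.toNat start_state := by
    show ((PySem.List.pyRange 0 N 1).foldl
        (fun g _ => bstep transitions (cvsStates transitions start_state) g)
        (PySem.Dict.ofList ((cvsStates transitions start_state).map (fun s =>
          (s, if accept_states.contains s then (1 : Int) else 0))))).getD start_state 0 = _
    have hrange : PySem.List.pyRange 0 N 1 = PySem.List.pyRange 0 (N.toNat : Int) 1 := by
      by_cases h : 0 ≤ N
      · rw [Int.toNat_of_nonneg h]
      · rw [PySem.List.pyRange_one_eq_nil (by omega), PySem.List.pyRange_one_eq_nil (by omega)]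
    rw [hrange]
    exact B_loop transitions accept_states _ hUnd hclosure N.toNat start_state hst
  -- exchange
  rw [hA, hB]
  calc (((cvsStates transitions start_state).filter (fun s => accept_states.contains s)).map
        (fun s => fvec transitions start_state (cvsStates transitions start_state) N.toNat s)).sum
      = ((cvsStates transitions start_state).map
          (fun s => fvec transitions start_state (cvsStates transitions start_state) N.toNat s
            * gfun transitions accept_states 0 s)).sum := by
        rw [← sum_filter_ite]
        exact congrArg List.sum (List.map_congr_left fun s _ => rfl)
    _ = ((cvsStates transitions start_state).map
          (fun s => fvec transitions start_state (cvsStates transitions start_state) 0 s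
            * gfun transitions accept_states (N.toNat + 0) s)).sum :=
        chain transitions start_state accept_states _ hUnd hclosure N.toNat 0
    _ = gfun transitions accept_states N.toNat start_state := by
        rw [show N.toNat + 0 = N.toNat from rfl]
        rw [← sum_ind (cvsStates transitions start_state) hUnd start_state hst
          (gfun transitions accept_states N.toNat)]
        refine congrArg List.sum (List.map_congr_left fun s _ => ?_)
        show (if s == start_state then (1 : Int) else 0) * _ = _
        rw [beq_swap]

-- ===== VERDICT (by name: the statement is the Claim_ definition above) =====
theorem count_valid_strings_spec : Claim_equal_count_valid_strings := by
  intro N transitions start_state accept_states _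
  unfold Spec_count_valid_strings
  exact main_equiv N transitions start_state accept_states
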